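-- pv_equiv track=rewrite | github.com/rahulsamineni2004/daacodes | daacodes.py | maxOnesRows
-- ===== SOURCE A (Python) =====
-- def maxOnesRows(mat):
--   max_count, max_rows = 0, []
--
--   for row in mat:
--     ones_count = row.count(1)
--     if ones_count > max_count:
--       max_count = ones_count
--       max_rows = [row]
--     elif ones_count == max_count:
--       max_rows.append(row)
--
--   return max_rows
-- ===== SOURCE B (Python) =====
-- def maxOnesRows(mat):
--   counts = [row.count(1) for row in mat]
--   m = max(counts, default=0)
--   return [row for row, c in zip(mat, counts) if c == m]
-- ===== Notes on version B (the rewrite author's own statement) =====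
-- stated objective: simpler
-- what changed: Replaced the single running-max accumulator loop (which rebuilds/extends max_rows as it goes) with a two-pass build-table-then-filter: compute the per-row one-counts, take the global maximum (default 0), then filter rows whose count equals it.
import Mathlib
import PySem

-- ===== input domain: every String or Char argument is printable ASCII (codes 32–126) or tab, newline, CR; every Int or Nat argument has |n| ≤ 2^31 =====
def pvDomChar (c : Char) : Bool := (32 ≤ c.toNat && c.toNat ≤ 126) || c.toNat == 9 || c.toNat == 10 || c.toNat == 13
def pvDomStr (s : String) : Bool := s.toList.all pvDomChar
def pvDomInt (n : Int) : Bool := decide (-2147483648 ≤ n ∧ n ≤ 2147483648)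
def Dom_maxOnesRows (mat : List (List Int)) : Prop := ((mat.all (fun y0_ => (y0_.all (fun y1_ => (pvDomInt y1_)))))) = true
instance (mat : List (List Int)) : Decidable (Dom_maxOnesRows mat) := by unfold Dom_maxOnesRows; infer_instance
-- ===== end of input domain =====

-- B replaces A's single running-max accumulator loop by a two-pass table-then-filter decomposition (objective: simpler).

-- ===== PORT A =====
-- one loop step of A's for-loop: state is (max_count, max_rows)
def maxOnesRowsStep (st : Nat × List (List Int)) (row : List Int) : Nat × List (List Int) :=
  let ones_count := PySem.List.count row (1 : Int)
  if ones_count > st.1 then (ones_count, [row])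
  else if ones_count = st.1 then (st.1, st.2 ++ [row])
  else st

def maxOnesRows (mat : List (List Int)) : List (List Int) :=
  (mat.foldl maxOnesRowsStep (0, [])).2

-- ===== PORT B =====
def maxOnesRows_alt (mat : List (List Int)) : List (List Int) :=
  let counts := mat.map (fun row => PySem.List.count row (1 : Int))
  let m := (PySem.List.max? counts (fun x => x)).getD 0
  ((mat.zip counts).filter (fun rc => rc.2 == m)).map Prod.fst

-- ===== PRECONDITION & SPEC =====
def Spec_maxOnesRows (mat : List (List Int)) (out : List (List Int)) : Prop := out = maxOnesRows_alt mat
instance (mat : List (List Int)) (out : List (List Int)) : Decidable (Spec_maxOnesRows mat out) := by unfold Spec_maxOnesRows; infer_instance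

-- ===== CLAIM (what is proved, stated in full; the proofs are below) =====
def Claim_equal_maxOnesRows : Prop := ∀ (mat : List (List Int)), Dom_maxOnesRows mat → Spec_maxOnesRows mat (maxOnesRows mat)

-- ===== LEMMAS AND PROOFS =====

-- A's fold, characterised: final max is the running max of the per-row counts, and
-- the collected rows are the (possibly kept) accumulator plus the rows of count = final max.
theorem maxOnesRows_foldl_char (mat : List (List Int)) (mc : Nat) (mr : List (List Int)) :
    mat.foldl maxOnesRowsStep (mc, mr) =
      ((mat.map (fun row => PySem.List.count row (1 : Int))).foldl max mc,
       (if (mat.map (fun row => PySem.List.count row (1 : Int))).foldl max mc = mc then mr else [])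
         ++ mat.filter (fun r =>
              PySem.List.count r (1 : Int) == (mat.map (fun row => PySem.List.count row (1 : Int))).foldl max mc)) := by
  induction mat generalizing mc mr with
  | nil => simp
  | cons row rest ih =>
    have hmax : ∀ (a : Nat) (l : List Nat), a ≤ l.foldl max a := by
      intro a l
      induction l generalizing a with
      | nil => simp
      | cons x t iht => exact le_trans (Nat.le_max_left a x) (iht (max a x))
    simp only [PySem.List.count_eq] at ih
    simp only [List.foldl_cons, List.map_cons, List.filter_cons, maxOnesRowsStep,
      PySem.List.count_eq]
    by_cases h1 : List.count (1 : Int) row > mc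
    · rw [if_pos h1, ih]
      have hMc : max mc (List.count (1 : Int) row) = List.count (1 : Int) row :=
        Nat.max_eq_right (Nat.le_of_lt h1)
      have hcF : List.count (1 : Int) row ≤
          (List.map (fun row => List.count (1 : Int) row) rest).foldl max (List.count (1 : Int) row) :=
        hmax _ _
      simp only [hMc, Prod.mk.injEq]
      refine ⟨trivial, ?_⟩
      clear ih hmax
      split_ifs <;> try omega
      all_goals try simp
      all_goals try simp only [beq_iff_eq] at *
      all_goals omega
    · by_cases h2 : List.count (1 : Int) row = mc
      · rw [if_neg h1, if_pos h2, ih]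
        have hMc : max mc (List.count (1 : Int) row) = mc := by
          rw [h2]; exact Nat.max_self mc
        simp only [hMc, Prod.mk.injEq]
        refine ⟨trivial, ?_⟩
        clear ih hmax
        split_ifs <;> try omega
        all_goals try simp
        all_goals try simp only [beq_iff_eq] at *
        all_goals omega
      · rw [if_neg h1, if_neg h2, ih]
        have hlt : List.count (1 : Int) row < mc :=
          Nat.lt_of_le_of_ne (Nat.le_of_not_lt h1) h2
        have hMc : max mc (List.count (1 : Int) row) = mc :=
          Nat.max_eq_left (Nat.le_of_lt hlt)
        have hmcF : mc ≤ (List.map (fun row => List.count (1 : Int) row) rest).foldl max mc :=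
          hmax _ _
        simp only [hMc, Prod.mk.injEq]
        refine ⟨trivial, ?_⟩
        clear ih hmax
        split_ifs <;> try omega
        all_goals try simp
        all_goals try simp only [beq_iff_eq] at *
        all_goals omega

-- B's max(counts, default=0) is the running max from 0
theorem max_getD_eq_foldl (l : List Nat) :
    (PySem.List.max? l (fun x => x)).getD 0 = l.foldl max 0 := by
  cases l with
  | nil => simp [PySem.List.max?]
  | cons x t =>
    rw [PySem.List.max?_id_cons]
    simp only [Option.getD_some, List.foldl_cons]
    have : max 0 x = x := Nat.max_eq_right (Nat.zero_le x)
    rw [this]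

-- B's zip-with-counts filter is a plain filter on the rows
theorem zip_map_filter (mat : List (List Int)) (f : List Int → Nat) (m : Nat) :
    ((mat.zip (mat.map f)).filter (fun rc => rc.2 == m)).map Prod.fst
      = mat.filter (fun r => f r == m) := by
  induction mat with
  | nil => simp
  | cons row rest ih =>
    simp only [List.map_cons, List.zip_cons_cons, List.filter_cons]
    by_cases h : (f row == m) = true
    · simp [h, ih]
    · simp only [h] at *
      simpa [h] using ih

-- ===== VERDICT (by name: the statement is the Claim_ definition above) =====
theorem maxOnesRows_spec : Claim_equal_maxOnesRows := by
  intro mat _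
  unfold Spec_maxOnesRows maxOnesRows maxOnesRows_alt
  rw [maxOnesRows_foldl_char mat 0 []]
  simp only []
  rw [max_getD_eq_foldl, zip_map_filter]
  split <;> simp
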